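-- pv_equiv track=rewrite | github.com/farah0303/OCR_Aide_navigation_paddle | table_extractor/table_detector.py | _map_bbox_to_original
-- ===== SOURCE A (Python) =====
-- from typing import List, Tuple, Dict, Any, Optional
--
-- def _map_bbox_to_original(bbox: Tuple[int, int, int, int], angle: int,
--                            orig_w: int, orig_h: int) -> Tuple[int, int, int, int]:
--     """Map a bbox from a rotated image back to original orientation."""
--     x1, y1, x2, y2 = bbox
--     points = [(x1, y1), (x2, y1), (x2, y2), (x1, y2)]
--     mapped = []
--
--     for x, y in points:
--         if angle == 0:
--             nx, ny = x, y
--         elif angle == 90: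
--             nx, ny = orig_w - 1 - y, x
--         elif angle == 180:
--             nx, ny = orig_w - 1 - x, orig_h - 1 - y
--         elif angle == 270:
--             nx, ny = y, orig_h - 1 - x
--         else:
--             raise ValueError(f"Unsupported angle: {angle}")
--         mapped.append((nx, ny))
--
--     xs = [p[0] for p in mapped]
--     ys = [p[1] for p in mapped]
--     return (
--         int(max(0, min(xs))),
--         int(max(0, min(ys))),
--         int(min(orig_w, max(xs))),
--         int(min(orig_h, max(ys)))
--     )
-- ===== SOURCE B (Python) =====
-- def _map_bbox_to_original(bbox, angle, orig_w, orig_h):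
--     x1, y1, x2, y2 = bbox
--     xmin, xmax = min(x1, x2), max(x1, x2)
--     ymin, ymax = min(y1, y2), max(y1, y2)
--     if angle == 0:
--         lx, hx, ly, hy = xmin, xmax, ymin, ymax
--     elif angle == 90:
--         lx, hx, ly, hy = orig_w - 1 - ymax, orig_w - 1 - ymin, xmin, xmax
--     elif angle == 180:
--         lx, hx = orig_w - 1 - xmax, orig_w - 1 - xmin
--         ly, hy = orig_h - 1 - ymax, orig_h - 1 - ymin
--     elif angle == 270:
--         lx, hx, ly, hy = ymin, ymax, orig_h - 1 - xmax, orig_h - 1 - xmin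
--     else:
--         raise ValueError(f"Unsupported angle: {angle}")
--     return (max(0, lx), max(0, ly), min(orig_w, hx), min(orig_h, hy))
-- ===== Notes on version B (the rewrite author's own statement) =====
-- stated objective: simpler
-- what changed: Replaces the 4-corner mapping loop and the post-hoc xs/ys min/max collection with one closed-form per-coordinate range map: compute xmin/xmax/ymin/ymax once, then derive the output interval endpoints directly per angle.
import Mathlib
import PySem

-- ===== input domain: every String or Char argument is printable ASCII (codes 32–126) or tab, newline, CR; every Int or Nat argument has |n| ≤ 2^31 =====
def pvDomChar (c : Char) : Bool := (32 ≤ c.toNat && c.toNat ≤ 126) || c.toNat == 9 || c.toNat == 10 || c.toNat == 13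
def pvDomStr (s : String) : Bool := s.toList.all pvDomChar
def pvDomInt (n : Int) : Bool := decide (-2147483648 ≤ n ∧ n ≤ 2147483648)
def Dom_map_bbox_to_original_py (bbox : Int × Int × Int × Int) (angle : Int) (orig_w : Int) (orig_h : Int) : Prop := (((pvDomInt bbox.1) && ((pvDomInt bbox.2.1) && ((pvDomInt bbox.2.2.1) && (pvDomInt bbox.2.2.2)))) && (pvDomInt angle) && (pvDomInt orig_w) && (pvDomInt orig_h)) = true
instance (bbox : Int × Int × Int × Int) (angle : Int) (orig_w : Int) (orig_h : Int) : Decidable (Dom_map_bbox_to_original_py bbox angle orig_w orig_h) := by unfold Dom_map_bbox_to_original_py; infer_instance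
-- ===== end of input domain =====

-- B replaces A's 4-corner mapping loop + xs/ys min/max collection with a direct
-- per-coordinate closed-form range map (objective: simpler).

-- ===== PORT A =====
-- A's per-corner rotation; the 'else' arm is Python's ValueError, excluded by Pre_.
def pvMapPointA (angle orig_w orig_h : Int) (p : Int × Int) : Int × Int :=
  if angle = 0 then (p.1, p.2)
  else if angle = 90 then (orig_w - 1 - p.2, p.1)
  else if angle = 180 then (orig_w - 1 - p.1, orig_h - 1 - p.2)
  else if angle = 270 then (p.2, orig_h - 1 - p.1)
  else (0, 0)  -- raise ValueError: unreachable under Pre_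

def map_bbox_to_original_py (bbox : Int × Int × Int × Int) (angle : Int) (orig_w : Int) (orig_h : Int) : Int × Int × Int × Int :=
  let x1 := bbox.1; let y1 := bbox.2.1; let x2 := bbox.2.2.1; let y2 := bbox.2.2.2
  let points : List (Int × Int) := [(x1, y1), (x2, y1), (x2, y2), (x1, y2)]
  let mapped := points.map (pvMapPointA angle orig_w orig_h)
  let xs := mapped.map Prod.fst
  let ys := mapped.map Prod.snd
  (max 0 ((PySem.List.min? xs (fun v => v)).getD 0),
   max 0 ((PySem.List.min? ys (fun v => v)).getD 0),
   min orig_w ((PySem.List.max? xs (fun v => v)).getD 0),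
   min orig_h ((PySem.List.max? ys (fun v => v)).getD 0))

-- ===== PORT B =====
def map_bbox_to_original_py_alt (bbox : Int × Int × Int × Int) (angle : Int) (orig_w : Int) (orig_h : Int) : Int × Int × Int × Int :=
  let x1 := bbox.1; let y1 := bbox.2.1; let x2 := bbox.2.2.1; let y2 := bbox.2.2.2
  let xmin := min x1 x2; let xmax := max x1 x2
  let ymin := min y1 y2; let ymax := max y1 y2
  let r : Int × Int × Int × Int :=
    if angle = 0 then (xmin, xmax, ymin, ymax)
    else if angle = 90 then (orig_w - 1 - ymax, orig_w - 1 - ymin, xmin, xmax)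
    else if angle = 180 then (orig_w - 1 - xmax, orig_w - 1 - xmin, orig_h - 1 - ymax, orig_h - 1 - ymin)
    else if angle = 270 then (ymin, ymax, orig_h - 1 - xmax, orig_h - 1 - xmin)
    else (0, 0, 0, 0)  -- raise ValueError: unreachable under Pre_
  (max 0 r.1, max 0 r.2.2.1, min orig_w r.2.1, min orig_h r.2.2.2)

-- ===== PRECONDITION & SPEC =====
-- Pre_ excludes exactly the angles on which A raises ValueError ("Unsupported angle").
def Pre_map_bbox_to_original_py (bbox : Int × Int × Int × Int) (angle : Int) (orig_w : Int) (orig_h : Int) : Prop :=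
  angle = 0 ∨ angle = 90 ∨ angle = 180 ∨ angle = 270
instance (bbox : Int × Int × Int × Int) (angle : Int) (orig_w : Int) (orig_h : Int) : Decidable (Pre_map_bbox_to_original_py bbox angle orig_w orig_h) := by unfold Pre_map_bbox_to_original_py; infer_instance

def pvWitness_map_bbox_to_original_py : (Int × Int × Int × Int) × Int × Int × Int := ((3, 4, 10, 12), 90, 20, 30)

def Spec_map_bbox_to_original_py (bbox : Int × Int × Int × Int) (angle : Int) (orig_w : Int) (orig_h : Int) (out : Int × Int × Int × Int) : Prop := out = map_bbox_to_original_py_alt bbox angle orig_w orig_h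
instance (bbox : Int × Int × Int × Int) (angle : Int) (orig_w : Int) (orig_h : Int) (out : Int × Int × Int × Int) : Decidable (Spec_map_bbox_to_original_py bbox angle orig_w orig_h out) := by unfold Spec_map_bbox_to_original_py; infer_instance

-- ===== CLAIM (what is proved, stated in full; the proofs are below) =====
def Claim_equal_map_bbox_to_original_py : Prop := ∀ (bbox : Int × Int × Int × Int) (angle : Int) (orig_w : Int) (orig_h : Int), Dom_map_bbox_to_original_py bbox angle orig_w orig_h → Pre_map_bbox_to_original_py bbox angle orig_w orig_h → Spec_map_bbox_to_original_py bbox angle orig_w orig_h (map_bbox_to_original_py bbox angle orig_w orig_h)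

-- ===== LEMMAS AND PROOFS =====

-- ===== VERDICT (by name: the statement is the Claim_ definition above) =====
theorem map_bbox_to_original_py_spec : Claim_equal_map_bbox_to_original_py := by
  intro bbox angle orig_w orig_h _ hpre
  obtain ⟨x1, y1, x2, y2⟩ := bbox
  unfold Spec_map_bbox_to_original_py map_bbox_to_original_py map_bbox_to_original_py_alt pvMapPointA
  rcases hpre with h | h | h | h <;> subst h <;>
    simp [PySem.List.min?_id_cons, PySem.List.max?_id_cons, List.map, List.foldl, Prod.ext_iff] <;>
    omega
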